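-- pv_equiv track=rewrite | github.com/Sravya263/Hackerrack-and-leetcode-practice | Leet Code/python.py | isPossibleToRearrange
-- ===== SOURCE A (Python) =====
-- from collections import defaultdict, Counter
-- from collections import defaultdict, OrderedDict
-- from collections import defaultdict
-- from collections import defaultdict
-- from collections import defaultdict, deque
--
-- def isPossibleToRearrange(s: str, t: str, k: int) -> bool:
--     eqLen = len(s)//k
--     sCounter = defaultdict(int)
--     for i in range(0, len(s), eqLen):
--         sCounter[s[i:i+eqLen]] += 1
--
--     for i in range(0, len(t), eqLen):
--         part = t[i:i+eqLen]
--         if sCounter[part] < 1: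
--             return False
--         sCounter[part] -= 1
--     return True
-- ===== SOURCE B (Python) =====
-- def isPossibleToRearrange(s: str, t: str, k: int) -> bool:
--     eqLen = len(s)//k
--     sp = sorted(s[i:i+eqLen] for i in range(0, len(s), eqLen))
--     tp = sorted(t[i:i+eqLen] for i in range(0, len(t), eqLen))
--     # merge scan over the two sorted piece lists: every piece of tp must be
--     # matched by a distinct equal piece of sp (sub-multiset containment)
--     i = j = 0
--     while j < len(tp):
--         if i == len(sp):
--             return False
--         if sp[i] < tp[j]:
--             i += 1
--         elif sp[i] == tp[j]:
--             i += 1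
--             j += 1
--         else:
--             return False
--     return True
-- ===== Notes on version B (the rewrite author's own statement) =====
-- stated objective: alternative
-- what changed: Replaces A's counting-dict consume-and-decrement loop with sorting both piece lists and a two-pointer merge scan that checks t's pieces form a sub-multiset of s's.
import Mathlib
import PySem

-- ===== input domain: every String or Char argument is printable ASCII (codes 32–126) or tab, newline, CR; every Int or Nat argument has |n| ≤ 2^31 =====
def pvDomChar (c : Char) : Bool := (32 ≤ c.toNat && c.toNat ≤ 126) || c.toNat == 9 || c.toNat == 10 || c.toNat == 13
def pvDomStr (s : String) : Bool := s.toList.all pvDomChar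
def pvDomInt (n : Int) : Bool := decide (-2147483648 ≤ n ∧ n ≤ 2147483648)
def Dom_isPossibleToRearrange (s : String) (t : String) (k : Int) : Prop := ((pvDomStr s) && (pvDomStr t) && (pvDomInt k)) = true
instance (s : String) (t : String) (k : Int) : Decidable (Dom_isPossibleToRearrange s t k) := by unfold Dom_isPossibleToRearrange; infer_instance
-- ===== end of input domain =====

-- B replaces A's counting dict with a sort-then-merge scan: both piece lists are
-- sorted and a two-pointer walk checks t's pieces are a sub-multiset of s's;
-- objective: alternative (same cost up to the sort's log factor).

-- ===== PORT A =====
-- the t-loop of A: reads sCounter[part] (defaultdict: missing = 0), early-returns False, else decrements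
def pvALoop (t : String) (eqLen : Int) (d : PySem.Dict String Int) : List Int → Bool
  | [] => true
  | i :: rest =>
    let part := PySem.Str.slice t (some i) (some (i + eqLen))
    if d.getD part 0 < 1 then false
    else pvALoop t eqLen (d.modify part 0 (· - 1)) rest

def isPossibleToRearrange (s : String) (t : String) (k : Int) : Bool :=
  let eqLen := PySem.Int.floordiv (PySem.Str.len s) k
  let sCounter := (PySem.List.pyRange 0 (PySem.Str.len s) eqLen).foldl
      (fun d i => d.modify (PySem.Str.slice s (some i) (some (i + eqLen))) 0 (· + 1))
      PySem.Dict.empty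
  pvALoop t eqLen sCounter (PySem.List.pyRange 0 (PySem.Str.len t) eqLen)

-- ===== PORT B =====
-- B's while loop over pointers i, j, transcribed as recursion on the two suffixes
-- sp[i:], tp[j:] (advancing a pointer = dropping the head)
def pvMerge : List String → List String → Bool
  | _, [] => true
  | [], _ :: _ => false
  | a :: sp, p :: tp =>
    if a < p then pvMerge sp (p :: tp)
    else if a = p then pvMerge sp tp
    else false

def isPossibleToRearrange_alt (s : String) (t : String) (k : Int) : Bool :=
  let eqLen := PySem.Int.floordiv (PySem.Str.len s) k
  let sp := PySem.List.sorted ((PySem.List.pyRange 0 (PySem.Str.len s) eqLen).map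
      (fun i => PySem.Str.slice s (some i) (some (i + eqLen)))) (fun x => x) false
  let tp := PySem.List.sorted ((PySem.List.pyRange 0 (PySem.Str.len t) eqLen).map
      (fun i => PySem.Str.slice t (some i) (some (i + eqLen)))) (fun x => x) false
  pvMerge sp tp

-- ===== PRECONDITION & SPEC =====
-- Pre_ excludes exactly where A raises: k = 0 (ZeroDivisionError) and len(s)//k = 0 (range step 0, ValueError)
def Pre_isPossibleToRearrange (s : String) (t : String) (k : Int) : Prop :=
  k ≠ 0 ∧ PySem.Int.floordiv (PySem.Str.len s) k ≠ 0
instance (s : String) (t : String) (k : Int) : Decidable (Pre_isPossibleToRearrange s t k) := by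
  unfold Pre_isPossibleToRearrange; infer_instance
def pvWitness_isPossibleToRearrange : String × String × Int := ("abab", "abab", 2)

def Spec_isPossibleToRearrange (s : String) (t : String) (k : Int) (out : Bool) : Prop := out = isPossibleToRearrange_alt s t k
instance (s : String) (t : String) (k : Int) (out : Bool) : Decidable (Spec_isPossibleToRearrange s t k out) := by unfold Spec_isPossibleToRearrange; infer_instance

-- ===== CLAIM (what is proved, stated in full; the proofs are below) =====
def Claim_equal_isPossibleToRearrange : Prop := ∀ (s : String) (t : String) (k : Int), Dom_isPossibleToRearrange s t k → Pre_isPossibleToRearrange s t k → Spec_isPossibleToRearrange s t k (isPossibleToRearrange s t k)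

-- ===== LEMMAS AND PROOFS =====

-- abstract version of A's t-loop, over the list of pieces instead of indices
def pvPartsLoop (d : PySem.Dict String Int) : List String → Bool
  | [] => true
  | p :: rest => if d.getD p 0 < 1 then false else pvPartsLoop (d.modify p 0 (· - 1)) rest

lemma pvALoop_eq_partsLoop (t : String) (e : Int) (d : PySem.Dict String Int) (idxs : List Int) :
    pvALoop t e d idxs
      = pvPartsLoop d (idxs.map (fun i => PySem.Str.slice t (some i) (some (i + e)))) := by
  induction idxs generalizing d with
  | nil => rfl
  | cons i rest ih => simp [pvALoop, pvPartsLoop, ih]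

lemma pvPartsLoop_iff (ps : List String) (d : PySem.Dict String Int) :
    pvPartsLoop d ps = true ↔ ∀ p ∈ ps, (ps.count p : Int) ≤ d.getD p 0 := by
  induction ps generalizing d with
  | nil => simp [pvPartsLoop]
  | cons p rest ih =>
    simp only [pvPartsLoop]
    have hcount : ∀ q : String, ((p :: rest).count q : Int)
        = (rest.count q : Int) + (if q = p then 1 else 0) := by
      intro q
      by_cases hqp : q = p
      · simp [hqp]
      · have hpq : p ≠ q := fun h => hqp h.symm
        simp [hqp, hpq]
    by_cases h : d.getD p 0 < 1
    · simp only [h, if_true]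
      constructor
      · intro hfalse; cases hfalse
      · intro hall
        have := hall p (by simp)
        rw [hcount p, if_pos rfl] at this
        have : (0 : Int) ≤ (rest.count p : Int) := by positivity
        omega
    · simp only [h, if_false, ih]
      constructor
      · intro hall q hq
        rcases List.mem_cons.mp hq with rfl | hq'
        · rw [hcount q, if_pos rfl]
          by_cases hqr : q ∈ rest
          · have := hall q hqr
            rw [PySem.Dict.getD_modify, if_pos rfl] at this
            omega
          · have h0 : rest.count q = 0 := List.count_eq_zero.mpr hqr
            rw [h0]; push_cast; omega
        · have := hall q hq'
          rw [PySem.Dict.getD_modify] at this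
          rw [hcount q]
          by_cases hqp : q = p
          · subst hqp; rw [if_pos rfl] at this ⊢; omega
          · rw [if_neg hqp] at this ⊢; omega
      · intro hall q hq
        rw [PySem.Dict.getD_modify]
        have := hall q (List.mem_cons_of_mem p hq)
        rw [hcount q] at this
        by_cases hqp : q = p
        · subst hqp; rw [if_pos rfl] at this ⊢; omega
        · rw [if_neg hqp] at this ⊢; omega

-- the merge scan on two ≤-sorted lists decides multiset containment
lemma pvMerge_iff (sp tp : List String)
    (hs : sp.Pairwise (· ≤ ·)) (ht : tp.Pairwise (· ≤ ·)) :
    pvMerge sp tp = true ↔ ∀ q : String, tp.count q ≤ sp.count q := by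
  induction sp generalizing tp with
  | nil =>
    cases tp with
    | nil => simp [pvMerge]
    | cons p tp' =>
      simp only [pvMerge]
      constructor
      · intro h; cases h
      · intro hall
        have := hall p
        simp at this
  | cons a sp' ih =>
    have hs' : sp'.Pairwise (· ≤ ·) := (List.pairwise_cons.mp hs).2
    have hsa : ∀ x ∈ sp', a ≤ x := (List.pairwise_cons.mp hs).1
    cases tp with
    | nil => simp [pvMerge]
    | cons p tp' =>
      have ht' : tp'.Pairwise (· ≤ ·) := (List.pairwise_cons.mp ht).2
      have htp : ∀ x ∈ tp', p ≤ x := (List.pairwise_cons.mp ht).1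
      simp only [pvMerge]
      by_cases hlt : a < p
      · rw [if_pos hlt, ih (p :: tp') hs' ht]
        have hane : a ∉ p :: tp' := by
          intro hmem
          rcases List.mem_cons.mp hmem with rfl | h'
          · exact absurd hlt (lt_irrefl a)
          · exact absurd (htp a h') (not_le.mpr hlt)
        have hcz : (p :: tp').count a = 0 := List.count_eq_zero.mpr hane
        constructor
        · intro hall q
          calc (p :: tp').count q ≤ sp'.count q := hall q
            _ ≤ (a :: sp').count q := by simp [List.count_cons]
        · intro hall q
          by_cases hqa : q = a
          · subst hqa; rw [hcz]; omega
          · have := hall q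
            simpa [List.count_cons, hqa, Ne.symm hqa] using this
      · rw [if_neg hlt]
        by_cases heq : a = p
        · rw [if_pos heq, ih tp' hs' ht']
          subst heq
          constructor
          · intro hall q
            by_cases hqa : q = a
            · subst hqa; simp; exact hall q
            · simpa [List.count_cons, hqa] using hall q
          · intro hall q
            have := hall q
            by_cases hqa : q = a
            · subst hqa; simp at this; omega
            · simpa [List.count_cons, hqa] using this
        · rw [if_neg heq]
          have hpa : p < a := lt_of_le_of_ne (not_lt.mp hlt) (fun h => heq h.symm)
          have hpne : p ∉ a :: sp' := by
            intro hmem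
            rcases List.mem_cons.mp hmem with rfl | h'
            · exact absurd hpa (lt_irrefl p)
            · exact absurd (hsa p h') (not_le.mpr hpa)
          constructor
          · intro h; cases h
          · intro hall
            have := hall p
            rw [List.count_eq_zero.mpr hpne] at this
            simp at this

theorem pv_key (s t : String) (e : Int) :
    pvALoop t e ((PySem.List.pyRange 0 (PySem.Str.len s) e).foldl
        (fun d i => d.modify (PySem.Str.slice s (some i) (some (i + e))) 0 (· + 1))
        PySem.Dict.empty) (PySem.List.pyRange 0 (PySem.Str.len t) e)
      = pvMerge
          (PySem.List.sorted ((PySem.List.pyRange 0 (PySem.Str.len s) e).map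
            (fun i => PySem.Str.slice s (some i) (some (i + e)))) (fun x => x) false)
          (PySem.List.sorted ((PySem.List.pyRange 0 (PySem.Str.len t) e).map
            (fun i => PySem.Str.slice t (some i) (some (i + e)))) (fun x => x) false) := by
  set sParts := (PySem.List.pyRange 0 (PySem.Str.len s) e).map
      (fun i => PySem.Str.slice s (some i) (some (i + e))) with hsP
  set tParts := (PySem.List.pyRange 0 (PySem.Str.len t) e).map
      (fun i => PySem.Str.slice t (some i) (some (i + e))) with htP
  have hfold : (PySem.List.pyRange 0 (PySem.Str.len s) e).foldl
      (fun d i => d.modify (PySem.Str.slice s (some i) (some (i + e))) 0 (· + 1))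
      PySem.Dict.empty = PySem.Dict.counter sParts := by
    rw [PySem.Dict.counter_eq_foldl, hsP, List.foldl_map]
  rw [hfold, pvALoop_eq_partsLoop, ← htP]
  rw [Bool.eq_iff_iff, pvPartsLoop_iff]
  rw [pvMerge_iff _ _ (PySem.List.sorted_pairwise _ _) (PySem.List.sorted_pairwise _ _)]
  have hcs : ∀ q : String, (PySem.List.sorted sParts (fun x => x) false).count q = sParts.count q :=
    fun q => (PySem.List.sorted_perm sParts (fun x => x) false).count_eq q
  have hct : ∀ q : String, (PySem.List.sorted tParts (fun x => x) false).count q = tParts.count q :=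
    fun q => (PySem.List.sorted_perm tParts (fun x => x) false).count_eq q
  constructor
  · intro hall q
    rw [hcs, hct]
    by_cases hq : q ∈ tParts
    · have := hall q hq
      rw [PySem.Dict.getD_counter] at this
      exact_mod_cast this
    · rw [List.count_eq_zero.mpr hq]; omega
  · intro hall p hp
    have := hall p
    rw [hcs, hct] at this
    rw [PySem.Dict.getD_counter]
    exact_mod_cast this

theorem pv_main (s t : String) (k : Int) :
    isPossibleToRearrange s t k = isPossibleToRearrange_alt s t k :=
  pv_key s t (PySem.Int.floordiv (PySem.Str.len s) k)

-- ===== VERDICT (by name: the statement is the Claim_ definition above) =====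
theorem isPossibleToRearrange_spec : Claim_equal_isPossibleToRearrange := by
  intro s t k _ _
  exact pv_main s t k
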